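-- pv_equiv track=rewrite | github.com/Shellay/LeetcodeSolutions | 174_dungeon_game.py | opt_path
-- ===== SOURCE A (Python) =====
-- def opt_path(inp):
--     """ Mind we are tracing the prince's health along the way and
--     guarding his life, not only waiting to see the final health.......
--
--     *. Accumulate active health along each path with accu[][]
--     *. Trace the lowest health along each path with low[][]
--       -> Update the entry low[r][c] each time when accumulated
--         health drops down under the lowest health so far.
--     *. Remember each path with path[][]
--     """
--     ROW = len(inp) ; COL = len(inp[0])
--     # Allocation
--     accu = [[None] * COL for _ in range(ROW)]
--     low  = [[None] * COL for _ in range(ROW)]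
--     path = [[None] * COL for _ in range(ROW)]
--     # Starting entry.
--     accu[0][0] = inp[0][0]
--     low[0][0]  = inp[0][0]
--     path[0][0] = 'START'
--     # Boundary values.
--     for c in range(1, COL):
--         accu[0][c] = accu[0][c-1] + inp[0][c]
--         path[0][c] = path[0][c-1] + ' RIGHT'
--         low[0][c] = min(low[0][c-1], accu[0][c])
--     for r in range(1, ROW):
--         accu[r][0] = accu[r-1][0] + inp[r][0]
--         path[r][0] = path[r-1][0] + ' DOWN'
--         low[r][0] = min(low[r-1][0], accu[r][0])
--     # Rest
--     for r in range(1, ROW):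
--         for c in range(1, COL):
--             if low[r][c-1] >= low[r-1][c]: # left-neighbor better than up-neighbor
--                 accu[r][c] = accu[r][c-1] + inp[r][c]
--                 low [r][c] = min(low[r][c-1], accu[r][c])
--                 path[r][c] = path[r][c-1] + ' RIGHT'
--             else:
--                 accu[r][c] = accu[r-1][c] + inp[r][c]
--                 low [r][c] = min(low[r-1][c], accu[r][c])
--                 path[r][c] = path[r-1][c] + ' DOWN'
--     return path[-1][-1]
-- ===== SOURCE B (Python) =====
-- def opt_path(inp):
--     # Stage 1: DP over (accu, low) only -- no path strings stored per cell.
--     # Stage 2: backtrack once from the last cell, replaying the same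
--     # left-vs-up comparisons on the low table, then join the moves.
--     COL = len(inp[0])
--     accu = []
--     low = []
--     for r, vals in enumerate(inp):
--         arow = []
--         lrow = []
--         for c in range(COL):
--             x = vals[c]
--             if r == 0 and c == 0:
--                 a = x
--                 l = x
--             elif r == 0:
--                 a = arow[c - 1] + x
--                 l = min(lrow[c - 1], a)
--             elif c == 0:
--                 a = accu[r - 1][0] + x
--                 l = min(low[r - 1][0], a)
--             elif lrow[c - 1] >= low[r - 1][c]:
--                 a = arow[c - 1] + x
--                 l = min(lrow[c - 1], a)
--             else:
--                 a = accu[r - 1][c] + x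
--                 l = min(low[r - 1][c], a)
--             arow.append(a)
--             lrow.append(l)
--         accu.append(arow)
--         low.append(lrow)
--     moves = []
--     r = len(inp) - 1
--     c = COL - 1
--     while r > 0 or c > 0:
--         if r == 0:
--             moves.append('RIGHT')
--             c -= 1
--         elif c == 0:
--             moves.append('DOWN')
--             r -= 1
--         elif low[r][c - 1] >= low[r - 1][c]:
--             moves.append('RIGHT')
--             c -= 1
--         else:
--             moves.append('DOWN')
--             r -= 1
--     moves.append('START')
--     return ' '.join(reversed(moves))
-- ===== Notes on version B (the rewrite author's own statement) =====
-- stated objective: faster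
-- what changed: A stores a full direction string in every DP cell (quadratic-length concatenations); B runs the DP over (accu, low) numbers only and reconstructs the direction string once at the end by backtracking over the low table and a single join.
import Mathlib
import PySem

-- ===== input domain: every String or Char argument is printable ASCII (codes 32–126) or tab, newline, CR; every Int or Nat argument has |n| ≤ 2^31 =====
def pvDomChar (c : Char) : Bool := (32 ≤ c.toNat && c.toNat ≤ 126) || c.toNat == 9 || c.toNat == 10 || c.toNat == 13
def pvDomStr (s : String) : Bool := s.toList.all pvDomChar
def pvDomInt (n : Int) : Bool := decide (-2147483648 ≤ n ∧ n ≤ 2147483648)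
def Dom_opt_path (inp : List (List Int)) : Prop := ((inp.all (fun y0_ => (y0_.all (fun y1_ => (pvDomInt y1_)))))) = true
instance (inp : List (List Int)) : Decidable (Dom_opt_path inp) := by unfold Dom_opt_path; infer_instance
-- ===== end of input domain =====

-- B drops A's per-cell path-string concatenation: it runs the DP over (accu, low)
-- numbers only and rebuilds the direction string once at the end by backtracking
-- over the low table (objective: faster, asymptotic).

def sSTART : List Char := ['S','T','A','R','T']
def sRIGHT : List Char := ['R','I','G','H','T']
def sDOWN  : List Char := ['D','O','W','N']

-- ===== PORT A =====
-- cell = (accu, low, path);  path kept as List Char (PySem string convention)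

-- first boundary row: for c in range(1, COL)
def scanRow0A : (Int × Int × List Char) → List Int → List (Int × Int × List Char)
  | _, [] => []
  | (a, l, p), x :: xs =>
      let a2 := a + x
      let cell := (a2, min l a2, p ++ ' ' :: sRIGHT)
      cell :: scanRow0A cell xs

-- inner loop: for c in range(1, COL), given the cell to the left and (up-cell, inp[r][c]) pairs
def scanRowA : (Int × Int × List Char) → List ((Int × Int × List Char) × Int) → List (Int × Int × List Char)
  | _, [] => []
  | (al, ll, pl), ((au, lu, pu), x) :: rest =>
      let cell := if ll ≥ lu
        then (al + x, min ll (al + x), pl ++ ' ' :: sRIGHT)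
        else (au + x, min lu (au + x), pu ++ ' ' :: sDOWN)
      cell :: scanRowA cell rest

-- outer loop: for r in range(1, ROW); state = the previous row of cells
def rowsA : List (Int × Int × List Char) → List (List Int) → List (Int × Int × List Char)
  | row, [] => row
  | row, inpRow :: rest =>
      match row, inpRow with
      | (au, lu, pu) :: ups, x :: xs =>
          let first := (au + x, min lu (au + x), pu ++ ' ' :: sDOWN)
          rowsA (first :: scanRowA first (ups.zip xs)) rest
      | _, _ => []   -- Python raises here (IndexError on a too-short row); excluded by Pre_

def opt_path (inp : List (List Int)) : String :=
  match inp with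
  | [] => ""            -- Python: IndexError (excluded by Pre_)
  | row0 :: rows =>
    match row0 with
    | [] => ""          -- Python: IndexError (excluded by Pre_)
    | x :: xs =>
      let c0 := (x, x, sSTART)
      let lastRow := rowsA (c0 :: scanRow0A c0 xs) rows
      -- getD default is unreachable under Pre_ (the row list is never empty there)
      String.ofList ((lastRow.getLast?.getD (0, 0, sSTART)).2.2)   -- path[-1][-1]

-- ===== PORT B =====
-- stage 1: (accu, low) pairs only, row by row

def bRow0 (a l : Int) : List Int → List (Int × Int)
  | [] => []
  | x :: xs => (a + x, min l (a + x)) :: bRow0 (a + x) (min l (a + x)) xs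

def bRow (al ll : Int) : List (Int × Int) → List Int → List (Int × Int)
  | (au, lu) :: ups, x :: xs =>
      if ll ≥ lu then
        (al + x, min ll (al + x)) :: bRow (al + x) (min ll (al + x)) ups xs
      else
        (au + x, min lu (au + x)) :: bRow (au + x) (min lu (au + x)) ups xs
  | _, _ => []

def bRows (prev : List (Int × Int)) : List (List Int) → List (List (Int × Int))
  | [] => []
  | vals :: rest =>
      match prev, vals with
      | (au, lu) :: ups, x :: xs =>
          let row := (au + x, min lu (au + x)) :: bRow (au + x) (min lu (au + x)) ups xs
          row :: bRows row rest
      | _, _ => []   -- Python raises here (IndexError); excluded by Pre_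

def lowAt (mat : List (List (Int × Int))) (r c : Nat) : Int :=
  ((mat.getD r []).getD c (0, 0)).2

-- stage 2: the while loop walking back from (R-1, C-1), collecting moves newest-first
def back (mat : List (List (Int × Int))) : Nat → Nat → List (List Char)
  | 0, 0 => []
  | 0, c + 1 => sRIGHT :: back mat 0 c
  | r + 1, 0 => sDOWN :: back mat r 0
  | r + 1, c + 1 =>
      if lowAt mat (r + 1) c ≥ lowAt mat r (c + 1) then sRIGHT :: back mat (r + 1) c
      else sDOWN :: back mat r (c + 1)
termination_by r c => r + c

def opt_path_alt (inp : List (List Int)) : String :=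
  match inp with
  | [] => ""
  | row0 :: rest =>
    match row0 with
    | [] => ""
    | x :: xs =>
      let firstRow := (x, x) :: bRow0 x x xs
      let mat := firstRow :: bRows firstRow rest
      let moves := back mat rest.length xs.length ++ [sSTART]
      String.ofList (PySem.Chars.join [' '] moves.reverse)

-- ===== PRECONDITION & SPEC =====
-- Pre_ is exactly A's return domain: A raises IndexError on an empty grid, on an empty first
-- row (COL = 0), and on any row shorter than the first row.
def Pre_opt_path (inp : List (List Int)) : Prop :=
  inp ≠ [] ∧ inp.headI ≠ [] ∧ ∀ row ∈ inp, inp.headI.length ≤ row.length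
instance (inp : List (List Int)) : Decidable (Pre_opt_path inp) := by unfold Pre_opt_path; infer_instance

def pvWitness_opt_path : List (List Int) := [[-2, -3, 3], [-5, -10, 1], [10, 30, -5]]

def Spec_opt_path (inp : List (List Int)) (out : String) : Prop := out = opt_path_alt inp
instance (inp : List (List Int)) (out : String) : Decidable (Spec_opt_path inp out) := by unfold Spec_opt_path; infer_instance

-- ===== CLAIM (what is proved, stated in full; the proofs are below) =====
def Claim_equal_opt_path : Prop := ∀ (inp : List (List Int)), Dom_opt_path inp → Pre_opt_path inp → Spec_opt_path inp (opt_path inp)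

-- ===== LEMMAS AND PROOFS =====

-- A's path string of a cell, read off B's backtracked move chain (newest move first)
def render : List (List Char) → List Char
  | [] => sSTART
  | m :: rest => render rest ++ ' ' :: m

-- annotate a row of B's (accu, low) pairs, starting at column c, with A's path strings
def ann (mat : List (List (Int × Int))) (r : Nat) : Nat → List (Int × Int) → List (Int × Int × List Char)
  | _, [] => []
  | c, (a, l) :: ps => (a, l, render (back mat r c)) :: ann mat r (c + 1) ps

theorem drop_cons_getD {α : Type} (l : List α) (c : Nat) (p : α) (rest : List α) (d : α)
    (h : l.drop c = p :: rest) : l.getD c d = p := by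
  have h1 : l[c]? = some p := by
    rw [← List.head?_drop, h]; rfl
  simp [List.getD, h1]

theorem drop_cons_drop {α : Type} (l : List α) (c : Nat) (p : α) (rest : List α)
    (h : l.drop c = p :: rest) : l.drop (c + 1) = rest := by
  have : l.drop (c + 1) = (l.drop c).drop 1 := by
    rw [List.drop_drop]
  rw [this, h]; rfl

theorem bRow_length (ups : List (Int × Int)) (xs : List Int) :
    ∀ al ll, (bRow al ll ups xs).length = min ups.length xs.length := by
  induction ups generalizing xs with
  | nil => intro al ll; cases xs <;> simp [bRow]
  | cons p ups ih =>
      obtain ⟨au, lu⟩ := p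
      intro al ll
      cases xs with
      | nil => simp [bRow]
      | cons x xs =>
          by_cases h : ll ≥ lu
          · simp [bRow, if_pos h, ih]
          · simp [bRow, if_neg h, ih]

theorem bRow0_length (xs : List Int) : ∀ a l, (bRow0 a l xs).length = xs.length := by
  induction xs with
  | nil => intro a l; rfl
  | cons x xs ih => intro a l; simp [bRow0, ih]

theorem row0_inv (mat : List (List (Int × Int))) (xs : List Int) :
    ∀ (c : Nat) (a l : Int),
    scanRow0A (a, l, render (back mat 0 c)) xs = ann mat 0 (c + 1) (bRow0 a l xs) := by
  induction xs with
  | nil => intro c a l; rfl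
  | cons x xs ih =>
      intro c a l
      simp only [scanRow0A, bRow0, ann]
      rw [show render (back mat 0 c) ++ ' ' :: sRIGHT = render (back mat 0 (c + 1)) from by
        simp [back, render]]
      exact congrArg _ (ih (c + 1) (a + x) (min l (a + x)))

theorem row_inv (mat : List (List (Int × Int))) (r : Nat) (ups : List (Int × Int)) :
    ∀ (xs : List Int) (c : Nat) (al ll : Int),
    (mat.getD r []).drop (c + 1) = ups →
    (mat.getD (r + 1) []).drop c = (al, ll) :: bRow al ll ups xs →
    scanRowA (al, ll, render (back mat (r + 1) c)) ((ann mat r (c + 1) ups).zip xs)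
      = ann mat (r + 1) (c + 1) (bRow al ll ups xs) := by
  induction ups with
  | nil => intro xs c al ll _ _; cases xs <;> simp [ann, scanRowA, bRow]
  | cons p ups ih =>
      obtain ⟨au, lu⟩ := p
      intro xs c al ll hup hrow
      cases xs with
      | nil => simp [ann, scanRowA, bRow]
      | cons x xs =>
          have hll : lowAt mat (r + 1) c = ll := by
            unfold lowAt; rw [drop_cons_getD _ _ _ _ _ hrow]
          have hlu : lowAt mat r (c + 1) = lu := by
            unfold lowAt; rw [drop_cons_getD _ _ _ _ _ hup]
          have hb : back mat (r + 1) (c + 1)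
              = if ll ≥ lu then sRIGHT :: back mat (r + 1) c else sDOWN :: back mat r (c + 1) := by
            simp only [back]; rw [hll, hlu]
          have hup' : (mat.getD r []).drop (c + 1 + 1) = ups := drop_cons_drop _ _ _ _ hup
          have hrow' := drop_cons_drop _ _ _ _ hrow
          by_cases h : ll ≥ lu
          · simp only [ann, List.zip_cons_cons, scanRowA, bRow, if_pos h]
            rw [show render (back mat (r + 1) c) ++ ' ' :: sRIGHT = render (back mat (r + 1) (c + 1)) from by
              rw [hb, if_pos h, render]]
            refine congrArg _ (ih xs (c + 1) (al + x) (min ll (al + x)) hup' ?_)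
            rw [hrow']; simp [bRow, if_pos h]
          · simp only [ann, List.zip_cons_cons, scanRowA, bRow, if_neg h]
            rw [show render (back mat r (c + 1)) ++ ' ' :: sDOWN = render (back mat (r + 1) (c + 1)) from by
              rw [hb, if_neg h, render]]
            refine congrArg _ (ih xs (c + 1) (au + x) (min lu (au + x)) hup' ?_)
            rw [hrow']; simp [bRow, if_neg h]

theorem rows_inv (mat : List (List (Int × Int))) (rest : List (List Int)) :
    ∀ (r : Nat) (au lu : Int) (ups : List (Int × Int)),
    mat.getD r [] = (au, lu) :: ups →
    mat.drop (r + 1) = bRows ((au, lu) :: ups) rest →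
    (∀ row ∈ rest, ups.length + 1 ≤ row.length) →
    rowsA (ann mat r 0 ((au, lu) :: ups)) rest
        = ann mat (r + rest.length) 0 (mat.getD (r + rest.length) [])
      ∧ (mat.getD (r + rest.length) []).length = ups.length + 1 := by
  induction rest with
  | nil =>
      intro r au lu ups hmat _ _
      refine ⟨?_, ?_⟩
      · simp only [List.length_nil, Nat.add_zero, rowsA, hmat]
      · simp only [List.length_nil, Nat.add_zero, hmat, List.length_cons]
  | cons vals rest ih =>
      intro r au lu ups hmat hdrop hlen
      have hv : ups.length + 1 ≤ vals.length := hlen vals List.mem_cons_self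
      cases vals with
      | nil => simp at hv
      | cons x xs =>
          have hxs : ups.length ≤ xs.length := by simp at hv; omega
          have hbl : (bRow (au + x) (min lu (au + x)) ups xs).length = ups.length := by
            rw [bRow_length]; omega
          have hdropc : mat.drop (r + 1)
              = ((au + x, min lu (au + x)) :: bRow (au + x) (min lu (au + x)) ups xs)
                :: bRows ((au + x, min lu (au + x)) :: bRow (au + x) (min lu (au + x)) ups xs) rest := by
            rw [hdrop]; rfl
          have hget1 : mat.getD (r + 1) []
              = (au + x, min lu (au + x)) :: bRow (au + x) (min lu (au + x)) ups xs :=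
            drop_cons_getD _ _ _ _ _ hdropc
          have hdrop2 : mat.drop (r + 1 + 1)
              = bRows ((au + x, min lu (au + x)) :: bRow (au + x) (min lu (au + x)) ups xs) rest :=
            drop_cons_drop _ _ _ _ hdropc
          have hlen' : ∀ row ∈ rest,
              (bRow (au + x) (min lu (au + x)) ups xs).length + 1 ≤ row.length := by
            intro row hr
            have := hlen row (List.mem_cons_of_mem _ hr)
            omega
          obtain ⟨ihA, ihL⟩ := ih (r + 1) (au + x) (min lu (au + x))
            (bRow (au + x) (min lu (au + x)) ups xs) hget1 hdrop2 hlen'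
          have hscan : scanRowA (au + x, min lu (au + x), render (back mat (r + 1) 0))
              ((ann mat r 1 ups).zip xs)
              = ann mat (r + 1) 1 (bRow (au + x) (min lu (au + x)) ups xs) :=
            row_inv mat r ups xs 0 (au + x) (min lu (au + x))
              (by rw [hmat]; rfl) (by rw [hget1]; rfl)
          have hfirst : render (back mat r 0) ++ ' ' :: sDOWN = render (back mat (r + 1) 0) := by
            simp [back, render]
          have hidx : r + ((x :: xs) :: rest).length = r + 1 + rest.length := by
            simp only [List.length_cons]; omega
          have estep : rowsA (ann mat r 0 ((au, lu) :: ups)) ((x :: xs) :: rest)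
              = rowsA (ann mat (r + 1) 0 (mat.getD (r + 1) [])) rest := by
            conv_rhs => rw [hget1]
            simp only [ann, rowsA]
            rw [hfirst, hscan]
          refine ⟨?_, ?_⟩
          · rw [estep, hget1, ihA, hidx]
          · rw [hidx]; omega

theorem ann_getLast (mat : List (List (Int × Int))) (r : Nat) (ps : List (Int × Int)) :
    ∀ c, ps ≠ [] →
    ((ann mat r c ps).getLast?.getD (0, 0, sSTART)).2.2
      = render (back mat r (c + (ps.length - 1))) := by
  induction ps with
  | nil => intro c h; exact absurd rfl h
  | cons p ps ih =>
      obtain ⟨a, l⟩ := p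
      intro c _
      cases ps with
      | nil => simp [ann]
      | cons q ps' =>
          obtain ⟨aq, lq⟩ := q
          simp only [ann, List.getLast?_cons_cons]
          rw [show ((aq, lq, render (back mat r (c + 1))) :: ann mat r (c + 1 + 1) ps')
              = ann mat r (c + 1) ((aq, lq) :: ps') from rfl]
          rw [ih (c + 1) (by simp)]
          congr 2
          simp
          omega

theorem join_append_singleton (sep y : List Char) (a : List Char) (xs : List (List Char)) :
    PySem.Chars.join sep (a :: xs ++ [y])
      = PySem.Chars.join sep (a :: xs) ++ sep ++ y := by
  induction xs generalizing a with
  | nil => simp [PySem.Chars.join_cons_cons, PySem.Chars.join_singleton, List.append_assoc]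
  | cons b xs ih =>
      simp only [List.cons_append, PySem.Chars.join_cons_cons]
      rw [← List.cons_append, ih b]
      simp [List.append_assoc]

theorem render_eq_join (n : List (List Char)) :
    render n = PySem.Chars.join [' '] (sSTART :: n.reverse) := by
  induction n with
  | nil => simp [render, PySem.Chars.join_singleton]
  | cons m rest ih =>
      simp only [render, ih, List.reverse_cons]
      rw [← List.cons_append, join_append_singleton]
      simp

-- ===== VERDICT (by name: the statement is the Claim_ definition above) =====
theorem opt_path_spec : Claim_equal_opt_path := by
  intro inp _ hpre
  obtain ⟨hne, hh, hlen⟩ := hpre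
  unfold Spec_opt_path opt_path opt_path_alt
  cases inp with
  | nil => exact absurd rfl hne
  | cons row0 rest =>
      cases row0 with
      | nil => simp [List.headI] at hh
      | cons x xs =>
          simp only []
          have hlen0 : ∀ row ∈ rest, (bRow0 x x xs).length + 1 ≤ row.length := by
            intro row hr
            have := hlen row (List.mem_cons_of_mem _ hr)
            simp [List.headI] at this
            rw [bRow0_length]
            omega
          obtain ⟨hA, hL⟩ := rows_inv (((x, x) :: bRow0 x x xs) :: bRows ((x, x) :: bRow0 x x xs) rest)
            rest 0 x x (bRow0 x x xs) rfl rfl hlen0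
          have h0 : (x, x, sSTART) :: scanRow0A (x, x, sSTART) xs
              = ann (((x, x) :: bRow0 x x xs) :: bRows ((x, x) :: bRow0 x x xs) rest) 0 0
                  ((x, x) :: bRow0 x x xs) := by
            have hr0 := row0_inv (((x, x) :: bRow0 x x xs) :: bRows ((x, x) :: bRow0 x x xs) rest) xs 0 x x
            have hstart : render (back (((x, x) :: bRow0 x x xs) :: bRows ((x, x) :: bRow0 x x xs) rest) 0 0) = sSTART := by
              simp [back, render]
            rw [ann, ← hr0, hstart]
          rw [h0, hA]
          set mat := ((x, x) :: bRow0 x x xs) :: bRows ((x, x) :: bRow0 x x xs) rest with hmatdef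
          simp only [Nat.zero_add] at hL ⊢
          have hFne : mat.getD rest.length [] ≠ [] := by
            intro hF; rw [hF] at hL; simp at hL
          rw [ann_getLast mat rest.length _ 0 hFne]
          have hidx2 : 0 + ((mat.getD rest.length []).length - 1) = xs.length := by
            rw [hL, bRow0_length]; omega
          rw [hidx2, render_eq_join, List.reverse_append, List.reverse_singleton,
            List.singleton_append]
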